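-- pv_equiv track=rewrite | github.com/SuperInstance/flux-stdlib | stdlib.py | _int_to_string_fn
-- ===== SOURCE A (Python) =====
-- def _int_to_string_fn(regs, mem):
--     """int_to_string: R0=value -> decimal string at mem[R4]. R2=digit count."""
--     val = regs.get(0, 0)
--     base = regs.get(4, 0) & 0xFFFF
--     negative = val < 0
--     val = abs(val)
--     digits = []
--     if val == 0:
--         digits = [0x30]
--     else:
--         while val > 0:
--             digits.append(0x30 + (val % 10))
--             val //= 10
--     digits.reverse()
--     if negative:
--         digits = [0x2D] + digits
--     digits.append(0x00)
--     for i, d in enumerate(digits):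
--         if base + i < len(mem):
--             mem[base + i] = d
--     regs_out = dict(regs)
--     regs_out[2] = len(digits) - 1
--     return regs_out, mem
-- ===== SOURCE B (Python) =====
-- def _int_to_string_fn(regs, mem):
--     """int_to_string: R0=value -> decimal string at mem[R4]. R2=digit count.
--     (Mutates mem in place, like the original.)"""
--     base = regs.get(4, 0) & 0xFFFF
--     digits = [ord(c) for c in str(regs.get(0, 0))] + [0x00]
--     for i, d in enumerate(digits):
--         if base + i < len(mem):
--             mem[base + i] = d
--     regs_out = dict(regs)
--     regs_out[2] = len(digits) - 1
--     return regs_out, mem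
-- ===== Notes on version B (the rewrite author's own statement) =====
-- stated objective: idiomatic
-- what changed: The manual divide-by-10 digit loop with reverse and explicit zero/negative branches is replaced by the built-in decimal conversion str(value) mapped to ASCII codes; the memory write loop and register update are kept.
import Mathlib
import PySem

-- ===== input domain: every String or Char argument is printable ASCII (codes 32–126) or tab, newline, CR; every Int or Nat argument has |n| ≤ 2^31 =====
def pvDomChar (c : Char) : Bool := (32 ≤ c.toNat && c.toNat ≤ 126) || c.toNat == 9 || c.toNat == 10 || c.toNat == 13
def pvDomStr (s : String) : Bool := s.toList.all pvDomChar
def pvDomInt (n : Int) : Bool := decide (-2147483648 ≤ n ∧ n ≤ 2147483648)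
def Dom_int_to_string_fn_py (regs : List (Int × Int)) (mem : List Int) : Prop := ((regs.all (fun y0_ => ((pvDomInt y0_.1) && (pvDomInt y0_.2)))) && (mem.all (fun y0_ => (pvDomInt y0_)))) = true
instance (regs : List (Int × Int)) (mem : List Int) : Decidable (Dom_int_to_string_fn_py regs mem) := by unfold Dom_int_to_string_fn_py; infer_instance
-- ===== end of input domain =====

-- B replaces A's manual divide-by-10 digit loop (with reverse and zero/negative branches)
-- by the built-in decimal conversion str(value); the memory-writing loop and register update
-- are unchanged.  Both the Python A and B mutate `mem` in place; the proof is about the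
-- returned pair.

-- ===== PORT A =====
-- the `while val > 0` loop of A: list of ASCII digit codes, least significant first
def pvLoopA (v : Int) : List Int :=
  if h : 0 < v then
    (0x30 + PySem.Int.mod v 10) :: pvLoopA (PySem.Int.floordiv v 10)
  else []
termination_by v.toNat
decreasing_by
  rw [PySem.Int.floordiv_eq_ediv_of_pos (by omega)]
  omega

def int_to_string_fn_py (regs : List (Int × Int)) (mem : List Int) : (List (Int × Int)) × List Int :=
  let d := PySem.Dict.ofList regs
  let val := d.getD 0 0
  let base := PySem.Int.band (d.getD 4 0) 0xFFFF
  let negative := val < 0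
  let v := |val|
  let digits0 := if v = 0 then [(0x30 : Int)] else pvLoopA v
  let digits1 := digits0.reverse
  let digits2 := if negative then (0x2D : Int) :: digits1 else digits1
  let digits := digits2 ++ [(0 : Int)]
  -- mem[base + i] = d : base = x & 0xFFFF is nonnegative, so .toNat is exact
  let mem' := (PySem.List.enumerate digits 0).foldl
    (fun m p => if base + p.1 < PySem.List.len m then m.set (base + p.1).toNat p.2 else m) mem
  ((d.insert 2 (PySem.List.len digits - 1)).items, mem')

-- ===== PORT B =====
def int_to_string_fn_py_alt (regs : List (Int × Int)) (mem : List Int) : (List (Int × Int)) × List Int :=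
  let d := PySem.Dict.ofList regs
  let base := PySem.Int.band (d.getD 4 0) 0xFFFF
  let digits := (PySem.Int.toChars (d.getD 0 0)).map (fun c => (c.toNat : Int)) ++ [(0 : Int)]
  -- mem[base + i] = d : base = x & 0xFFFF is nonnegative, so .toNat is exact
  let mem' := (PySem.List.enumerate digits 0).foldl
    (fun m p => if base + p.1 < PySem.List.len m then m.set (base + p.1).toNat p.2 else m) mem
  ((d.insert 2 (PySem.List.len digits - 1)).items, mem')

-- ===== PRECONDITION & SPEC =====
def Spec_int_to_string_fn_py (regs : List (Int × Int)) (mem : List Int) (out : (List (Int × Int)) × List Int) : Prop := out = int_to_string_fn_py_alt regs mem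
instance (regs : List (Int × Int)) (mem : List Int) (out : (List (Int × Int)) × List Int) : Decidable (Spec_int_to_string_fn_py regs mem out) := by unfold Spec_int_to_string_fn_py; infer_instance

-- ===== CLAIM (what is proved, stated in full; the proofs are below) =====
def Claim_equal_int_to_string_fn_py : Prop := ∀ (regs : List (Int × Int)) (mem : List Int), Dom_int_to_string_fn_py regs mem → Spec_int_to_string_fn_py regs mem (int_to_string_fn_py regs mem)

-- ===== LEMMAS AND PROOFS =====

-- core: Nat.toDigitsCore, mapped to ASCII codes, is A's reversed loop output
theorem pvCore (g : Char → Int) (hg : g = fun c => (c.toNat : Int)) :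
    ∀ (fuel n : Nat) (acc : List Char), 0 < n → n < fuel →
      (Nat.toDigitsCore 10 fuel n acc).map g
        = (pvLoopA (n : Int)).reverse ++ acc.map g := by
  intro fuel
  induction fuel with
  | zero => intro n acc h1 h2; omega
  | succ f ih =>
    intro n acc h1 h2
    have h10 : (10 : Int) = ((10 : Nat) : Int) := rfl
    rw [pvLoopA, dif_pos (show (0 : Int) < (n : Int) by exact_mod_cast h1), h10,
      PySem.Int.mod_natCast, PySem.Int.floordiv_natCast]
    have hd : g (Nat.digitChar (n % 10)) = 0x30 + ((n % 10 : Nat) : Int) := by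
      have hlt : n % 10 < 10 := Nat.mod_lt _ (by omega)
      interval_cases h : n % 10 <;> rw [hg] <;> decide
    rw [Nat.toDigitsCore]
    by_cases hz : n / 10 = 0
    · rw [if_pos hz, hz]
      have hnil : pvLoopA (0 : Int) = [] := by rw [pvLoopA]; simp
      simp [hd, hnil]
    · rw [if_neg hz, ih (n / 10) _ (Nat.pos_of_ne_zero hz) (by omega)]
      simp [hd]

theorem pvDigits (val : Int) :
    ((if val < 0 then (0x2D : Int) :: (if |val| = 0 then [(0x30 : Int)] else pvLoopA |val|).reverse
      else (if |val| = 0 then [(0x30 : Int)] else pvLoopA |val|).reverse))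
      = (PySem.Int.toChars val).map (fun c => (c.toNat : Int)) := by
  rcases lt_trichotomy val 0 with h | h | h
  · have habs : |val| = ((-val).toNat : Int) := by
      rw [abs_of_neg h, Int.toNat_of_nonneg (by omega)]
    have h0 : 0 < (-val).toNat := by omega
    simp only [PySem.Int.toChars, if_pos h, List.map_cons]
    rw [habs, if_neg (show ¬ (((-val).toNat : Int) = 0) by exact_mod_cast h0.ne'),
      show val.natAbs = (-val).toNat by omega,
      show Nat.toDigits 10 (-val).toNat
        = Nat.toDigitsCore 10 ((-val).toNat + 1) (-val).toNat [] from rfl,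
      pvCore _ rfl _ _ _ h0 (by omega)]
    simp
  · subst h; simp [PySem.Int.toChars, Nat.toDigits, Nat.toDigitsCore, Nat.digitChar]
  · have habs : |val| = (val.toNat : Int) := by
      rw [abs_of_pos h, Int.toNat_of_nonneg (by omega)]
    have h0 : 0 < val.toNat := by omega
    simp only [PySem.Int.toChars, if_neg (show ¬ val < 0 by omega)]
    rw [habs, if_neg (show ¬ ((val.toNat : Int) = 0) by exact_mod_cast h0.ne'),
      show Nat.toDigits 10 val.toNat
        = Nat.toDigitsCore 10 (val.toNat + 1) val.toNat [] from rfl,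
      pvCore _ rfl _ _ _ h0 (by omega)]
    simp

-- ===== VERDICT (by name: the statement is the Claim_ definition above) =====
theorem int_to_string_fn_py_spec : Claim_equal_int_to_string_fn_py := by
  intro regs mem _
  show int_to_string_fn_py regs mem = int_to_string_fn_py_alt regs mem
  simp only [int_to_string_fn_py, int_to_string_fn_py_alt, pvDigits]
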